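-- pv_equiv track=rewrite | github.com/kennethjang34/epi | epi_judge_python/snake_string.py | using_2d_arr
-- ===== SOURCE A (Python) =====
-- import itertools
--
-- def using_2d_arr(s: str) -> str:
--     l = len(s)
--     rows = [[], [], []]
--     cycle = itertools.cycle([1, 0, 1, 2])
--     for c in s:
--         row = rows[cycle.__next__()]
--         row.append(c)
--     return "".join([c for r in rows for c in r])
-- ===== SOURCE B (Python) =====
-- def using_2d_arr(s: str) -> str:
--     return s[1::4] + s[0::2] + s[3::4]
-- ===== Notes on version B (the rewrite author's own statement) =====
-- stated objective: idiomatic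
-- what changed: Replaces the per-character cycle([1,0,1,2]) dispatch into three row buffers with a direct concatenation of three strided slices s[1::4] + s[0::2] + s[3::4].
import Mathlib
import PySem

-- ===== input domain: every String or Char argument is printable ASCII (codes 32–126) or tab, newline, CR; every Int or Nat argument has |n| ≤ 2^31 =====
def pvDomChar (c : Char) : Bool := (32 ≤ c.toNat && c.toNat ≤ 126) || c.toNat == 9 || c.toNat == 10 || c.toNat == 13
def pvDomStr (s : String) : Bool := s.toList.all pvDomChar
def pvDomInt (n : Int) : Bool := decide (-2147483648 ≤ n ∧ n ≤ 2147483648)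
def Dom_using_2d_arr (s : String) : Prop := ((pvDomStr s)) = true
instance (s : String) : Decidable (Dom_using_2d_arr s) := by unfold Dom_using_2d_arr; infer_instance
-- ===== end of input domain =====

-- B replaces A's per-character cycle dispatch into three row buffers by three strided
-- slices s[1::4] + s[0::2] + s[3::4] (objective: idiomatic; same O(n) cost).

-- ===== PORT A =====
-- one step of A's 'for c in s' loop: state = ((row0, row1, row2), position);
-- itertools.cycle([1, 0, 1, 2]).__next__() at position i is [1, 0, 1, 2][i % 4]
def pvStepA (st : (List Char × List Char × List Char) × Nat) (c : Char) :
    (List Char × List Char × List Char) × Nat :=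
  let rows := st.1
  let k := [1, 0, 1, 2].getD (st.2 % 4) 0
  let rows' :=
    if k = 0 then (rows.1 ++ [c], rows.2.1, rows.2.2)
    else if k = 1 then (rows.1, rows.2.1 ++ [c], rows.2.2)
    else (rows.1, rows.2.1, rows.2.2 ++ [c])
  (rows', st.2 + 1)

def using_2d_arr (s : String) : String :=
  let _l := PySem.Str.len s   -- 'l = len(s)' (unused in A as well)
  let final := s.toList.foldl pvStepA (([], [], []), 0)
  -- '"".join([c for r in rows for c in r])'
  String.ofList (final.1.1 ++ final.1.2.1 ++ final.1.2.2)

-- ===== PORT B =====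
-- Source B: return s[1::4] + s[0::2] + s[3::4]  (each slice via PySem.List.slice?,
-- exact for Python's extended slicing; step ≠ 0 so getD [] is never the default)
def using_2d_arr_alt (s : String) : String :=
  let l := s.toList
  String.ofList (((PySem.List.slice? l (some 1) none 4).getD []) ++
             ((PySem.List.slice? l (some 0) none 2).getD []) ++
             ((PySem.List.slice? l (some 3) none 4).getD []))

-- ===== PRECONDITION & SPEC =====
def Spec_using_2d_arr (s : String) (out : String) : Prop := out = using_2d_arr_alt s
instance (s : String) (out : String) : Decidable (Spec_using_2d_arr s out) := by unfold Spec_using_2d_arr; infer_instance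

-- ===== CLAIM (what is proved, stated in full; the proofs are below) =====
def Claim_equal_using_2d_arr : Prop := ∀ (s : String), Dom_using_2d_arr s → Spec_using_2d_arr s (using_2d_arr s)

-- ===== LEMMAS AND PROOFS =====

-- the elements of l at positions r, r+m, r+2m, …
def pvPick (m : Nat) : Nat → List Char → List Char
  | _, [] => []
  | 0, c :: cs => c :: pvPick m (m - 1) cs
  | r + 1, _ :: cs => pvPick m r cs

-- the three rows A's loop builds from position i onwards
def pvRows : Nat → List Char → List Char × List Char × List Char
  | _, [] => ([], [], [])
  | i, c :: cs =>
    let r := pvRows (i + 1) cs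
    if i % 4 = 1 then (c :: r.1, r.2.1, r.2.2)
    else if i % 4 = 3 then (r.1, r.2.1, c :: r.2.2)
    else (r.1, c :: r.2.1, r.2.2)

theorem slice?_nil (r m : Nat) (hm : 0 < m) :
    PySem.List.slice? ([] : List Char) (some (r:Int)) none (m:Int) = some [] := by
  have hm' : (m:Int) ≠ 0 := by exact_mod_cast hm.ne'
  have h1 : ¬((m:Int) < 0) := by omega
  have h2 : (0:Int) < m := by exact_mod_cast hm
  have h4 : ¬((r:Int) < 0) := by omega
  simp only [PySem.List.slice?, PySem.List.sliceIndices, hm', if_false, if_neg h1, if_neg h4,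
    if_pos h2, List.length_nil]
  push_cast
  have : min (r:Int) (0:Int) = 0 := by omega
  rw [this]
  simp

theorem slice?_cons_succ (x : Char) (xs : List Char) (a m : Nat) (hm : 0 < m) :
    PySem.List.slice? (x::xs) (some ((a:Int)+1)) none (m:Int) = PySem.List.slice? xs (some (a:Int)) none (m:Int) := by
  have hm' : (m:Int) ≠ 0 := by exact_mod_cast hm.ne'
  have h1 : ¬((m:Int) < 0) := by omega
  have h2 : (0:Int) < m := by exact_mod_cast hm
  have h3 : ¬((a:Int) + 1 < 0) := by omega
  have h4 : ¬((a:Int) < 0) := by omega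
  simp only [PySem.List.slice?, PySem.List.sliceIndices, hm', if_false, if_neg h1, if_neg h3,
    if_neg h4, if_pos h2, List.length_cons]
  push_cast
  have hmin : min ((a:Int) + 1) ((xs.length:Int) + 1) = min (a:Int) (xs.length:Int) + 1 := by omega
  rw [hmin]
  have hlt : (min (a:Int) (xs.length:Int) + 1 < (xs.length:Int) + 1) ↔ (min (a:Int) (xs.length:Int) < (xs.length:Int)) := by omega
  simp only [hlt]
  by_cases hc : min (a:Int) (xs.length:Int) < (xs.length:Int)
  · simp only [if_pos hc]
    have harith : ((xs.length:Int) + 1 - (min (a:Int) (xs.length:Int) + 1) + m - 1) = ((xs.length:Int) - min (a:Int) (xs.length:Int) + m - 1) := by ring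
    rw [harith]
    congr 1
    apply List.filterMap_congr
    intro k hk
    have hk0 : (0:Int) ≤ min (a:Int) (xs.length:Int) + (m:Int) * k := by positivity
    have : (min (a:Int) (xs.length:Int) + 1 + (m:Int) * k).toNat = (min (a:Int) (xs.length:Int) + (m:Int) * k).toNat + 1 := by omega
    rw [this, List.getElem?_cons_succ]
  · simp only [if_neg hc]
    simp

theorem slice?_cons_zero (x : Char) (xs : List Char) (m : Nat) (hm : 0 < m) :
    PySem.List.slice? (x::xs) (some (0:Int)) none (m:Int)
      = (PySem.List.slice? xs (some ((m - 1 : Nat):Int)) none (m:Int)).map (x :: ·) := by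
  have hm' : (m:Int) ≠ 0 := by exact_mod_cast hm.ne'
  have h1 : ¬((m:Int) < 0) := by omega
  have h2 : (0:Int) < m := by exact_mod_cast hm
  have h3 : ¬((0:Int) < 0) := by omega
  have h4 : ¬(((m-1:Nat):Int) < 0) := by omega
  simp only [PySem.List.slice?, PySem.List.sliceIndices, hm', if_false, if_neg h1, if_neg h3,
    if_neg h4, if_pos h2, List.length_cons]
  push_cast
  have hmcast : ((m-1:Nat):Int) = (m:Int) - 1 := by omega
  rw [hmcast]
  have hmin0 : min (0:Int) ((xs.length:Int)+1) = 0 := by omega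
  rw [hmin0]
  have hpos : (0:Int) < (xs.length:Int) + 1 := by omega
  rw [if_pos hpos]
  by_cases hc : (m:Int) - 1 < (xs.length:Int)
  · have hminm : min ((m:Int)-1) (xs.length:Int) = (m:Int) - 1 := by omega
    rw [hminm, if_pos hc]
    have e1 : ((xs.length:Int) + 1 - 0 + m - 1) / m = ((xs.length:Int) - ((m:Int)-1) + m - 1) / m + 1 := by
      have : ((xs.length:Int) + 1 - 0 + m - 1) = ((xs.length:Int) - ((m:Int)-1) + m - 1) + 1 * m := by ring
      rw [this, Int.add_mul_ediv_right _ _ (by omega : (m:Int) ≠ 0)]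
    rw [e1]
    have e2 : (((xs.length:Int) - ((m:Int)-1) + m - 1) / m + 1).toNat
        = (((xs.length:Int) - ((m:Int)-1) + m - 1) / m).toNat + 1 := by
      have : 0 ≤ ((xs.length:Int) - ((m:Int)-1) + m - 1) / m := by
        apply Int.ediv_nonneg <;> omega
      omega
    rw [e2, List.range_succ_eq_map]
    simp only [List.filterMap_cons, List.filterMap_map]
    simp only [Nat.cast_zero, mul_zero, add_zero, Int.toNat_zero, List.getElem?_cons_zero]
    simp only [Option.map_some]
    congr 1
    congr 1
    apply List.filterMap_congr
    intro k hk
    simp only [Function.comp]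
    have hmk : (0:Int) ≤ (m:Int) * (k:Int) := by positivity
    have hexp : (m:Int) * ((k:Int)+1) = (m:Int)*(k:Int) + m := by ring
    have : ((0:Int) + (m:Int) * ((k+1:Nat):Int)).toNat = (((m:Int)-1) + (m:Int) * (k:Int)).toNat + 1 := by
      push_cast; omega
    rw [this, List.getElem?_cons_succ]
  · have hminm : min ((m:Int)-1) (xs.length:Int) = (xs.length:Int) := by omega
    rw [hminm]
    have hns : ¬ ((xs.length:Int) < (xs.length:Int)) := by omega
    rw [if_neg hns]
    have e1 : (((xs.length:Int) + 1 - 0 + m - 1) / m).toNat = 1 := by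
      have : ((xs.length:Int) + 1 - 0 + m - 1) = ((xs.length:Int)) + 1 * m := by ring
      rw [this, Int.add_mul_ediv_right _ _ (by omega : (m:Int) ≠ 0)]
      have : (xs.length:Int) / m = 0 := Int.ediv_eq_zero_of_lt (by omega) (by omega)
      omega
    rw [e1]
    simp

theorem slice?_eq_pick (l : List Char) (r m : Nat) (hm : 0 < m) (hr : r < m) :
    PySem.List.slice? l (some (r:Int)) none (m:Int) = some (pvPick m r l) := by
  induction l generalizing r with
  | nil => rw [slice?_nil r m hm]; rfl
  | cons c cs ih =>
    cases r with
    | zero =>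
      have : ((0:Nat):Int) = (0:Int) := by norm_num
      rw [this, slice?_cons_zero c cs m hm, ih (m-1) (by omega)]
      rfl
    | succ r' =>
      have : ((r'+1:Nat):Int) = ((r':Nat):Int) + 1 := by push_cast; ring
      rw [this, slice?_cons_succ c cs r' m hm, ih r' (by omega)]
      rfl

theorem foldl_stepA (l : List Char) :
    ∀ (r0 r1 r2 : List Char) (i : Nat),
      l.foldl pvStepA ((r0, r1, r2), i)
        = ((r0 ++ (pvRows i l).1, r1 ++ (pvRows i l).2.1, r2 ++ (pvRows i l).2.2), i + l.length) := by
  induction l with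
  | nil => intro r0 r1 r2 i; simp [pvRows]
  | cons c cs ih =>
    intro r0 r1 r2 i
    have h4 : i % 4 = 0 ∨ i % 4 = 1 ∨ i % 4 = 2 ∨ i % 4 = 3 := by omega
    rcases h4 with h | h | h | h <;>
      simp [List.foldl_cons, pvStepA, h, ih, pvRows, List.length_cons] <;> omega

theorem pvRows_eq_pick (l : List Char) :
    ∀ i : Nat, pvRows i l
      = (pvPick 4 ((5 - i % 4) % 4) l, pvPick 2 ((2 - i % 2) % 2) l, pvPick 4 ((7 - i % 4) % 4) l) := by
  induction l with
  | nil => intro i; simp [pvRows, pvPick]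
  | cons c cs ih =>
    intro i
    have h4 : i % 4 = 0 ∨ i % 4 = 1 ∨ i % 4 = 2 ∨ i % 4 = 3 := by omega
    rcases h4 with h | h | h | h <;>
    · have h2 : i % 2 = i % 4 % 2 := by omega
      have h4' : (i+1) % 4 = (i % 4 + 1) % 4 := by omega
      have h2' : (i+1) % 2 = (i % 4 + 1) % 2 := by omega
      simp [pvRows, h, h2, h4', h2', ih, pvPick]

theorem using_2d_arr_eq (s : String) : using_2d_arr s = using_2d_arr_alt s := by
  unfold using_2d_arr using_2d_arr_alt
  rw [foldl_stepA s.toList [] [] [] 0, pvRows_eq_pick s.toList 0]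
  have b1 := slice?_eq_pick s.toList 1 4 (by norm_num) (by norm_num)
  have b2 := slice?_eq_pick s.toList 0 2 (by norm_num) (by norm_num)
  have b3 := slice?_eq_pick s.toList 3 4 (by norm_num) (by norm_num)
  push_cast at b1 b2 b3
  simp [b1, b2, b3]

-- ===== VERDICT (by name: the statement is the Claim_ definition above) =====
theorem using_2d_arr_spec : Claim_equal_using_2d_arr := by
  intro s _
  unfold Spec_using_2d_arr
  exact using_2d_arr_eq s
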